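-- pv_equiv track=rewrite | github.com/ayim/taubench-modern | core/tests/platforms/groq/test_e2e.py | _build_models_allowlist
-- ===== SOURCE A (Python) =====
-- def _build_models_allowlist(models: list[str]) -> dict[str, list[str]]:
--     allowlist: dict[str, set[str]] = {}
--     for model in models:
--         try:
--             _, provider, slug = model.split("/", 2)
--         except ValueError:
--             continue
--         allowlist.setdefault(provider, set()).add(slug)
--     return {provider: sorted(slugs) for provider, slugs in allowlist.items()}
-- ===== SOURCE B (Python) =====
-- def _build_models_allowlist(models):
--     result = {}
--     for model in models:
--         parts = model.split("/", 2)
--         if len(parts) != 3: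
--             continue
--         provider, slug = parts[1], parts[2]
--         lst = result.get(provider)
--         if lst is None:
--             result[provider] = [slug]
--         else:
--             i = 0
--             while i < len(lst) and lst[i] < slug:
--                 i += 1
--             if i == len(lst) or lst[i] != slug:
--                 lst.insert(i, slug)
--     return result
-- ===== Notes on version B (the rewrite author's own statement) =====
-- stated objective: alternative
-- what changed: Replaces the per-provider set plus a final sorted() pass over every entry by a single pass that keeps each provider's slug list sorted and duplicate-free via in-place ordered insertion, and replaces the try/except unpack by an explicit length check on split's result.
import Mathlib
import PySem

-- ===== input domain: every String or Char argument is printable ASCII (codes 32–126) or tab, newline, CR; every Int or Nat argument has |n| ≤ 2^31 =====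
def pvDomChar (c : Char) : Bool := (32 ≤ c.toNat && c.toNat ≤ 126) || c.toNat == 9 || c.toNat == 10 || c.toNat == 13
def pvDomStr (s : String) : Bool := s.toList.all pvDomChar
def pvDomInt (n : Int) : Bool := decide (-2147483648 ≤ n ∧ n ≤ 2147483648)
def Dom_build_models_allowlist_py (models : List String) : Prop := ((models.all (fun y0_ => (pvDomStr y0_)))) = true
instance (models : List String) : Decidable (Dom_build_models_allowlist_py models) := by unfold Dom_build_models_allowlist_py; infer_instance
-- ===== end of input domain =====

-- B replaces A's per-provider set + final sorted() pass by a single pass that keeps each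
-- provider's list sorted and duplicate-free via in-place ordered insertion (objective: alternative).

-- ===== PORT A =====
-- allowlist.setdefault(provider, set()).add(slug)  ==  allowlist[provider] = allowlist.get(provider, set()) ∪ {slug}  (PySem.Dict.modify)
def pvStepA (d : PySem.Dict String (PySem.Set String)) (model : String) : PySem.Dict String (PySem.Set String) :=
  match PySem.Str.splitMax? model "/" 2 with
  | some [_, provider, slug] => d.modify provider PySem.Set.empty (fun s => PySem.Set.add s slug)
  | _ => d

def build_models_allowlist_py (models : List String) : List (String × List String) :=
  ((models.foldl pvStepA PySem.Dict.empty).items).map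
    (fun p => (p.1, PySem.List.sorted p.2 (fun x => x) false))

-- ===== PORT B =====
-- the while-loop + conditional lst.insert(i, slug) of Source B: ordered insertion skipping duplicates
def pvInsSorted (lst : List String) (slug : String) : List String :=
  match lst with
  | [] => [slug]
  | y :: ys =>
    if y < slug then y :: pvInsSorted ys slug
    else if y == slug then y :: ys
    else slug :: y :: ys

def pvStepB (d : PySem.Dict String (List String)) (model : String) : PySem.Dict String (List String) :=
  match PySem.Str.splitMax? model "/" 2 with
  | some [_, provider, slug] =>
    match d.get? provider with
    | none => d.insert provider [slug]
    | some lst => d.insert provider (pvInsSorted lst slug)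
  | _ => d

def build_models_allowlist_py_alt (models : List String) : List (String × List String) :=
  (models.foldl pvStepB PySem.Dict.empty).items

-- ===== PRECONDITION & SPEC =====
def Spec_build_models_allowlist_py (models : List String) (out : List (String × List String)) : Prop := out = build_models_allowlist_py_alt models
instance (models : List String) (out : List (String × List String)) : Decidable (Spec_build_models_allowlist_py models out) := by unfold Spec_build_models_allowlist_py; infer_instance

-- ===== CLAIM (what is proved, stated in full; the proofs are below) =====
def Claim_equal_build_models_allowlist_py : Prop := ∀ (models : List String), Dom_build_models_allowlist_py models → Spec_build_models_allowlist_py models (build_models_allowlist_py models)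

-- ===== LEMMAS AND PROOFS =====

-- the value translation A's final dict-comprehension applies to each entry
def pvF (p : String × PySem.Set String) : String × List String :=
  (p.1, PySem.List.sorted p.2 (fun x => x) false)

theorem pvInsSorted_mem (l : List String) (x z : String) :
    z ∈ pvInsSorted l x ↔ z = x ∨ z ∈ l := by
  induction l with
  | nil => simp [pvInsSorted]
  | cons y ys ih =>
    simp only [pvInsSorted]
    split_ifs with h1 h2
    · simp only [List.mem_cons, ih]; tauto
    · have hyx : y = x := by simpa using h2
      subst hyx; simp only [List.mem_cons]; tauto
    · simp only [List.mem_cons]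

theorem pvInsSorted_of_mem (l : List String) (x : String)
    (hs : l.Pairwise (· < ·)) (hx : x ∈ l) : pvInsSorted l x = l := by
  induction l with
  | nil => cases hx
  | cons y ys ih =>
    simp only [pvInsSorted]
    rcases List.mem_cons.mp hx with rfl | hx'
    · simp
    · have hyx : y < x := (List.pairwise_cons.mp hs).1 x hx'
      rw [if_pos hyx, ih (List.pairwise_cons.mp hs).2 hx']

theorem pvInsSorted_perm (l : List String) (x : String) (hx : x ∉ l) :
    (pvInsSorted l x).Perm (x :: l) := by
  induction l with
  | nil => simp [pvInsSorted]
  | cons y ys ih =>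
    simp only [pvInsSorted]
    have hne : y ≠ x := fun h => hx (h ▸ List.mem_cons_self)
    split_ifs with h1 h2
    · exact ((ih (fun h => hx (List.mem_cons_of_mem _ h))).cons y).trans (List.Perm.swap x y ys)
    · exact absurd (by simpa using h2) hne
    · exact List.Perm.refl _

theorem pvInsSorted_pairwise (l : List String) (x : String)
    (hs : l.Pairwise (· < ·)) : (pvInsSorted l x).Pairwise (· < ·) := by
  induction l with
  | nil => simp [pvInsSorted]
  | cons y ys ih =>
    obtain ⟨hy, hys⟩ := List.pairwise_cons.mp hs
    simp only [pvInsSorted]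
    split_ifs with h1 h2
    · refine List.pairwise_cons.mpr ⟨?_, ih hys⟩
      intro z hz
      rcases (pvInsSorted_mem ys x z).mp hz with rfl | hz'
      · exact h1
      · exact hy z hz'
    · exact hs
    · have hxy : x < y := lt_of_le_of_ne (le_of_not_gt h1) (fun h => h2 (by simp [h]))
      refine List.pairwise_cons.mpr ⟨?_, hs⟩
      intro z hz
      rcases List.mem_cons.mp hz with rfl | hz'
      · exact hxy
      · exact hxy.trans (hy z hz')

-- the key fact: ordered insertion on the sorted view equals sorting the set after add
theorem pvInsSorted_sorted (s : PySem.Set String) (x : String) (hnd : s.Nodup) :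
    pvInsSorted (PySem.List.sorted s (fun x => x) false) x
      = PySem.List.sorted (PySem.Set.add s x) (fun x => x) false := by
  set l := PySem.List.sorted s (fun x => x) false with hl
  have hperm : l.Perm s := PySem.List.sorted_perm s _ _
  have hndl : l.Nodup := hperm.nodup_iff.mpr hnd
  have hle : l.Pairwise (· ≤ ·) := by
    simpa using PySem.List.sorted_pairwise s (fun x => x)
  have hlt : l.Pairwise (· < ·) := by
    have := List.Pairwise.and hle hndl
    exact this.imp (fun h => lt_of_le_of_ne h.1 h.2)
  by_cases hx : x ∈ s
  · have hcont : s.contains x = true := by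
      simpa [PySem.Set.contains] using hx
    rw [PySem.Set.add, if_pos hcont, ← hl, pvInsSorted_of_mem l x hlt (by rw [hl]; exact (PySem.List.mem_sorted s _ _ x).mpr hx)]
  · have hcont : ¬ s.contains x = true := by
      simpa [PySem.Set.contains] using hx
    rw [PySem.Set.add, if_neg hcont]
    refine (PySem.List.sorted_eq_of_perm_of_pairwise_lt _ _ _ ?_ ?_).symm
    · exact (pvInsSorted_perm l x (fun h => hx (hperm.mem_iff.mp h))).trans
        (((hperm.cons x).trans (List.perm_append_singleton x s).symm))
    · exact pvInsSorted_pairwise l x hlt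

theorem pvGet?_mapf (l : List (String × PySem.Set String)) (k : String) :
    (PySem.Dict.mk (l.map pvF)).get? k
      = ((PySem.Dict.mk l).get? k).map (fun s => PySem.List.sorted s (fun x => x) false) := by
  induction l with
  | nil => simp [PySem.Dict.get?]
  | cons p rest ih =>
    obtain ⟨a, b⟩ := p
    simp only [List.map_cons, pvF, PySem.Dict.get?_mk_cons]
    split_ifs <;> simp [ih]

theorem pvStep_rel (dA : PySem.Dict String (PySem.Set String)) (dB : PySem.Dict String (List String))
    (h : dB.items = dA.items.map pvF) (hn : ∀ p ∈ dA.items, (p.2 : List String).Nodup) (m : String) :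
    (pvStepB dB m).items = (pvStepA dA m).items.map pvF
      ∧ ∀ p ∈ (pvStepA dA m).items, (p.2 : List String).Nodup := by
  unfold pvStepA pvStepB
  cases hs : PySem.Str.splitMax? m "/" 2 with
  | none => exact ⟨h, hn⟩
  | some parts =>
    rcases parts with _ | ⟨a, _ | ⟨k, _ | ⟨x, _ | ⟨w, rest⟩⟩⟩⟩
    · exact ⟨h, hn⟩
    · exact ⟨h, hn⟩
    · exact ⟨h, hn⟩
    · -- the unpack succeeds: provider k, slug x
      have hget : dB.get? k = (dA.get? k).map (fun s => PySem.List.sorted s (fun x => x) false) := by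
        have hdB : dB = PySem.Dict.mk (dA.items.map pvF) := PySem.Dict.ext h
        rw [hdB]
        exact pvGet?_mapf dA.items k
      have hnodA : (dA.getD k PySem.Set.empty : List String).Nodup := by
        cases hA : dA.get? k with
        | none =>
          rw [PySem.Dict.getD_of_get?_eq_none _ _ hA]
          simp [PySem.Set.empty]
        | some s =>
          rw [PySem.Dict.getD_of_get?_eq_some _ _ hA]
          exact hn (k, s) (PySem.Dict.mem_items_of_get?_eq_some _ hA)
      have hBval : (match dB.get? k with
            | none => dB.insert k [x]
            | some lst => dB.insert k (pvInsSorted lst x))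
          = dB.insert k (pvInsSorted (PySem.List.sorted (dA.getD k PySem.Set.empty) (fun x => x) false) x) := by
        cases hA : dA.get? k with
        | none =>
          rw [hget, hA, PySem.Dict.getD_of_get?_eq_none _ _ hA]
          rfl
        | some s =>
          rw [hget, hA, PySem.Dict.getD_of_get?_eq_some _ _ hA]
          rfl
      show (match dB.get? k with
            | none => dB.insert k [x]
            | some lst => dB.insert k (pvInsSorted lst x)).items
          = (dA.modify k PySem.Set.empty (fun s => PySem.Set.add s x)).items.map pvF ∧ _
      rw [hBval, pvInsSorted_sorted _ x hnodA]
      have hcont : dB.contains k = dA.contains k := by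
        simp [PySem.Dict.contains, h, List.any_map, Function.comp_def, pvF]
      have hmod : dA.modify k PySem.Set.empty (fun s => PySem.Set.add s x)
          = dA.insert k (PySem.Set.add (dA.getD k PySem.Set.empty) x) := rfl
      rw [hmod]
      constructor
      · rw [PySem.Dict.items_insert, PySem.Dict.items_insert, hcont]
        split_ifs with hc
        · rw [h, List.map_map, List.map_map]
          refine List.map_congr_left ?_
          intro p _
          by_cases hp : p.1 = k <;> simp [pvF, hp]
        · rw [h, List.map_append]
          simp [pvF]
      · intro p hp
        rcases (PySem.Dict.mem_items_insert _ _ _ _).mp hp with rfl | ⟨hpold, _⟩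
        · exact PySem.Set.nodup_add _ x hnodA
        · exact hn p hpold
    · exact ⟨h, hn⟩

theorem pvFold_rel (models : List String) (dA : PySem.Dict String (PySem.Set String))
    (dB : PySem.Dict String (List String))
    (h : dB.items = dA.items.map pvF) (hn : ∀ p ∈ dA.items, (p.2 : List String).Nodup) :
    (models.foldl pvStepB dB).items = (models.foldl pvStepA dA).items.map pvF := by
  induction models generalizing dA dB with
  | nil => simpa using h
  | cons m ms ih =>
    obtain ⟨h', hn'⟩ := pvStep_rel dA dB h hn m
    exact ih _ _ h' hn'

-- ===== VERDICT (by name: the statement is the Claim_ definition above) =====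
theorem build_models_allowlist_py_spec : Claim_equal_build_models_allowlist_py := by
  intro models _
  unfold Spec_build_models_allowlist_py build_models_allowlist_py build_models_allowlist_py_alt
  rw [pvFold_rel models PySem.Dict.empty PySem.Dict.empty (by simp [PySem.Dict.empty]) (by simp [PySem.Dict.empty])]
  rfl
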